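-- pv_equiv track=rewrite | github.com/wmm98/homework1 | 7章之后刷题/考题/统计满足条件的数字.py | search
-- ===== SOURCE A (Python) =====
-- def search(k):
--     list1 = []
--     for i in range(1, k):
--         result = i % 3
--         i1 = str(i)[::-1]
--         if result == 0 and int(i1[0]) == 6:
--             list1.append(i)
--     list2 = sorted(list1)
--     return list2
-- ===== SOURCE B (Python) =====
-- def search(k):
--     # Numbers divisible by 3 whose decimal representation ends in 6 are exactly
--     # the integers congruent to 6 mod 30; generate them directly.
--     return list(range(6, k, 30))
-- ===== Notes on version B (the rewrite author's own statement) =====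
-- stated objective: faster
-- what changed: Instead of scanning every i in range(1,k) and testing i%3==0 and last-digit-6 via string reversal, B generates the answers directly as the arithmetic progression range(6,k,30), since n%3==0 and n ending in 6 is equivalent to n≡6 (mod 30).
import Mathlib
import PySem

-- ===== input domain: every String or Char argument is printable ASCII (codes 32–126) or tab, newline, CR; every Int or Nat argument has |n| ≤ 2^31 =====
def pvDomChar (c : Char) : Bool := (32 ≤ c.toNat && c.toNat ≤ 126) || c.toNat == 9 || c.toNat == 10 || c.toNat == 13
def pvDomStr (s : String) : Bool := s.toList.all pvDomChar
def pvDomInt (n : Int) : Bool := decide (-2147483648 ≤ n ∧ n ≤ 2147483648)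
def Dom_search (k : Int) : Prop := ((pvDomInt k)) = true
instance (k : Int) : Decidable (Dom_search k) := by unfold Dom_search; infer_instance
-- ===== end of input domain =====

-- B replaces A's scan of every i in range(1,k) (with a per-i string reversal) by directly
-- generating the arithmetic progression range(6, k, 30), the same list.

-- ===== PORT A =====
-- loop body: result = i % 3; i1 = str(i)[::-1]; if result == 0 and int(i1[0]) == 6: list1.append(i)
-- the Option `none` cases (elim default acc) are where Python would raise; unreachable for i ≥ 1 (str(i) nonempty, last char a digit)
def searchStep (acc : List Int) (i : Int) : List Int :=
  let result := PySem.Int.mod i 3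
  ((PySem.Str.slice? (PySem.Int.toStr i) none none (-1)).bind (fun i1 =>
      (PySem.Str.pyGet? i1 0).bind (fun c => PySem.Int.ofChars? [c]))).elim
    acc (fun v => if result == 0 && v == 6 then acc ++ [i] else acc)

def search (k : Int) : List Int :=
  let list1 := (PySem.List.pyRange 1 k 1).foldl searchStep []
  let list2 := PySem.List.sorted list1 (fun x => x) false
  list2

-- ===== PORT B =====
def search_alt (k : Int) : List Int := PySem.List.pyRange 6 k 30

-- ===== PRECONDITION & SPEC =====
def Spec_search (k : Int) (out : List Int) : Prop := out = search_alt k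
instance (k : Int) (out : List Int) : Decidable (Spec_search k out) := by unfold Spec_search; infer_instance

-- ===== CLAIM (what is proved, stated in full; the proofs are below) =====
def Claim_equal_search : Prop := ∀ (k : Int), Dom_search k → Spec_search k (search k)

-- ===== LEMMAS AND PROOFS =====

-- the Boolean test A's loop body amounts to (for i ≥ 1): i % 3 == 0 and i's last decimal digit is 6
def pcond (i : Int) : Bool := (PySem.Int.mod i 3 == 0) && (PySem.Int.mod i 10 == 6)

theorem tdc_append (b : Nat) : ∀ (f n : Nat) (ds : List Char),
    Nat.toDigitsCore b f n ds = Nat.toDigitsCore b f n [] ++ ds := by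
  intro f
  induction f with
  | zero => intro n ds; simp [Nat.toDigitsCore]
  | succ f ih =>
    intro n ds
    simp only [Nat.toDigitsCore]
    by_cases h : n / b = 0
    · simp [h]
    · simp only [h, if_false]
      rw [ih (n/b) (Nat.digitChar (n % b) :: ds), ih (n/b) [Nat.digitChar (n % b)]]
      simp

theorem toDigits_getLast? (b m : Nat) :
    (Nat.toDigits b m).getLast? = some (Nat.digitChar (m % b)) := by
  show (Nat.toDigitsCore b (m+1) m []).getLast? = _
  simp only [Nat.toDigitsCore]
  by_cases h : m / b = 0
  · simp [h]
  · simp only [h, if_false]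
    rw [tdc_append]
    simp

theorem pyGet?_zero_head? (l : List Char) : PySem.List.pyGet? l 0 = l.head? := by
  cases l <;> simp [PySem.List.pyGet?, PySem.List.pyIdx?]

theorem ofChars?_digitChar (d : Nat) (hd : d < 10) :
    PySem.Int.ofChars? [Nat.digitChar d] = some (d : Int) := by
  interval_cases d <;> decide

theorem lastChar_of_pos (i : Int) (h : 1 ≤ i) :
    PySem.Str.pyGet? (String.ofList (PySem.Int.toStr i).toList.reverse) 0
      = some (Nat.digitChar (i.toNat % 10)) := by
  simp [PySem.Str.pyGet?, PySem.Int.toList_toStr, PySem.Int.toChars, show ¬ i < 0 by omega]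
  rw [pyGet?_zero_head?, List.head?_reverse, toDigits_getLast?]

theorem searchStep_eq (acc : List Int) (i : Int) (h : 1 ≤ i) :
    searchStep acc i = if pcond i then acc ++ [i] else acc := by
  unfold searchStep
  rw [PySem.Str.slice?_none_none_neg_one, Option.bind_some, lastChar_of_pos i h, Option.bind_some,
    ofChars?_digitChar (i.toNat % 10) (by omega)]
  simp only [Option.elim_some, pcond]
  congr 1
  have h10 : PySem.Int.mod i 10 = i % 10 := PySem.Int.mod_eq_emod_of_pos (by norm_num)
  have hc : ((i.toNat % 10 : Nat) : Int) = i % 10 := by omega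
  rw [hc, h10]

theorem pairwise_lt_pyRange_30 (k : Int) : (PySem.List.pyRange 6 k 30).Pairwise (· < ·) := by
  rw [PySem.List.pyRange_of_pos 6 k (by norm_num : (0:Int) < 30)]
  rw [List.pairwise_map]
  exact List.pairwise_lt_range.imp (fun hab => by omega)

theorem filter_eq_pyRange_30 (k : Int) :
    (PySem.List.pyRange 1 k 1).filter pcond = PySem.List.pyRange 6 k 30 := by
  have h1 : ((PySem.List.pyRange 1 k 1).filter pcond).Pairwise (· < ·) :=
    (PySem.List.pairwise_lt_pyRange_one 1 k).filter _
  have h2 := pairwise_lt_pyRange_30 k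
  have n1 : ((PySem.List.pyRange 1 k 1).filter pcond).Nodup := h1.imp (fun hlt => ne_of_lt hlt)
  have n2 : (PySem.List.pyRange 6 k 30).Nodup := h2.imp (fun hlt => ne_of_lt hlt)
  have hmem : ∀ x, x ∈ (PySem.List.pyRange 1 k 1).filter pcond ↔ x ∈ PySem.List.pyRange 6 k 30 := by
    intro x
    rw [List.mem_filter, PySem.List.mem_pyRange_one,
      PySem.List.mem_pyRange_iff_of_pos (by norm_num : (0:Int) < 30)]
    have h3 : PySem.Int.mod x 3 = x % 3 := PySem.Int.mod_eq_emod_of_pos (by norm_num)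
    have h10 : PySem.Int.mod x 10 = x % 10 := PySem.Int.mod_eq_emod_of_pos (by norm_num)
    simp only [pcond, Bool.and_eq_true, beq_iff_eq, h3, h10]
    constructor
    · rintro ⟨⟨hx1, hxk⟩, hm3, hm10⟩
      refine ⟨by omega, hxk, by omega⟩
    · rintro ⟨hx6, hxk, hdvd⟩
      obtain ⟨c, hc⟩ := hdvd
      refine ⟨⟨by omega, hxk⟩, by omega, by omega⟩
  have hp : ((PySem.List.pyRange 1 k 1).filter pcond).Perm (PySem.List.pyRange 6 k 30) :=
    List.perm_of_nodup_nodup_toFinset_eq n1 n2 (by ext x; simp only [List.mem_toFinset, hmem x])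
  exact hp.eq_of_pairwise (fun a b _ _ hab hba => absurd hba (not_lt.mpr hab.le)) h1 h2

theorem search_eq (k : Int) : search k = search_alt k := by
  unfold search search_alt
  have hfold : (PySem.List.pyRange 1 k 1).foldl searchStep []
      = (PySem.List.pyRange 1 k 1).foldl (fun acc i => if pcond i then acc ++ [i] else acc) [] := by
    apply PySem.List.foldl_congr_mem
    intro acc x hx
    exact searchStep_eq acc x ((PySem.List.mem_pyRange_one.mp hx).1)
  rw [hfold, PySem.List.foldl_append_if_eq_filter, List.nil_append, filter_eq_pyRange_30]
  exact PySem.List.sorted_eq_of_perm_of_pairwise_lt _ _ _ (List.Perm.refl _) (pairwise_lt_pyRange_30 k)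

-- ===== VERDICT (by name: the statement is the Claim_ definition above) =====
theorem search_spec : Claim_equal_search := by
  intro k _
  unfold Spec_search
  exact search_eq k
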